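-- pv_equiv track=rewrite | github.com/ccasimiro88/TranslateAlignRetrieve | translate/src/translate_squad_utils.py | get_left_right_close_index
-- ===== SOURCE A (Python) =====
-- def get_left_right_close_index(indexes_list, number, type):
--     if isinstance(indexes_list, list) and indexes_list:
--         # The >= condition is necessary to return exactly the same number if is in the list
--         if type == 'left':
--             if number > min(indexes_list):
--                 left_indexes = [idx for idx in indexes_list if (number - idx) >= 0]
--                 left_close_index = min(left_indexes, key=lambda x: abs(number - x))
--                 return left_close_index
--             else:
--                 return min(indexes_list)
--
--         elif type == 'right':
--             if number < max(indexes_list):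
--                 right_indexes = [idx for idx in indexes_list if (number - idx) <= 0]
--                 right_close_index = min(right_indexes, key=lambda x: abs(number - x))
--                 return right_close_index
--             else:
--                 return max(indexes_list)
--     else:
--         return number
-- ===== SOURCE B (Python) =====
-- def get_left_right_close_index(indexes_list, number, type):
--     # single pass per branch instead of min/max + filter + keyed min (alternative decomposition)
--     if not (isinstance(indexes_list, list) and indexes_list):
--         return number
--     if type == 'left':
--         mn = None   # running minimum (fallback)
--         best = None # largest element <= number
--         for idx in indexes_list:
--             if mn is None or idx < mn:
--                 mn = idx
--             if idx <= number and (best is None or idx > best):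
--                 best = idx
--         return best if best is not None else mn
--     elif type == 'right':
--         mx = None
--         best = None # smallest element >= number
--         for idx in indexes_list:
--             if mx is None or idx > mx:
--                 mx = idx
--             if idx >= number and (best is None or idx < best):
--                 best = idx
--         return best if best is not None else mx
--     return None
-- ===== Notes on version B (the rewrite author's own statement) =====
-- stated objective: alternative
-- what changed: B replaces A's min()/max() plus a filtered intermediate list plus a keyed min per branch by one single scan per branch that simultaneously tracks the running min/max and the closest in-range element.
-- outside the precondition, e.g. on get_left_right_close_index([1, 2], 1, 'up'): A returns None, B returns None
import Mathlib
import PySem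

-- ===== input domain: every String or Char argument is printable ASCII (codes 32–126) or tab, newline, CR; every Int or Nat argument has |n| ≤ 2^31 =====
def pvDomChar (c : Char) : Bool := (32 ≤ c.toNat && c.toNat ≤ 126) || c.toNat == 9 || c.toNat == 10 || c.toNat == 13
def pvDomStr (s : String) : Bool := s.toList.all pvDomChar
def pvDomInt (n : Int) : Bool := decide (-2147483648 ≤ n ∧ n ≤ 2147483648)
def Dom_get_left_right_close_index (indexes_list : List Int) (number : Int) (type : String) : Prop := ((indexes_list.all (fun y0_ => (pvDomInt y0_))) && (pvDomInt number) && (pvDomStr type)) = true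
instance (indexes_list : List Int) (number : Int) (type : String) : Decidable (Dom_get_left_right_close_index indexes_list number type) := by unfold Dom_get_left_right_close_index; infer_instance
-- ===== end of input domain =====

-- B does the same job in ONE scan per branch (running min/max + closest in-range element),
-- instead of A's min()/max() plus a filtered intermediate list plus a keyed min (alternative decomposition, same cost).

-- ===== PORT A =====
-- literal port of A; min(l) / min(l, key=…) are PySem.List.min?; `.getD 0` only
-- discharges the Option on branches where the list is provably nonempty (Python min never raises there)
def get_left_right_close_index (indexes_list : List Int) (number : Int) (type : String) : Int :=
  if indexes_list ≠ [] then
    if type = "left" then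
      if number > (PySem.List.min? indexes_list (fun x => x)).getD 0 then
        let left_indexes := indexes_list.filter (fun idx => decide (number - idx ≥ 0))
        (PySem.List.min? left_indexes (fun x => |number - x|)).getD 0
      else
        (PySem.List.min? indexes_list (fun x => x)).getD 0
    else if type = "right" then
      if number < (PySem.List.max? indexes_list (fun x => x)).getD 0 then
        let right_indexes := indexes_list.filter (fun idx => decide (number - idx ≤ 0))
        (PySem.List.min? right_indexes (fun x => |number - x|)).getD 0
      else
        (PySem.List.max? indexes_list (fun x => x)).getD 0
    else 0  -- Python A returns None here (no Int); excluded by Pre_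
  else number

-- ===== PORT B =====
-- one fold step of B's 'left' loop: state = (running min, largest element ≤ number)
def altStepLeft (number : Int) (s : Option Int × Option Int) (idx : Int) : Option Int × Option Int :=
  (match s.1 with
   | none => some idx
   | some m => if idx < m then some idx else some m,
   if idx ≤ number then
     match s.2 with
     | none => some idx
     | some b => if idx > b then some idx else some b
   else s.2)

-- one fold step of B's 'right' loop: state = (running max, smallest element ≥ number)
def altStepRight (number : Int) (s : Option Int × Option Int) (idx : Int) : Option Int × Option Int :=
  (match s.1 with
   | none => some idx
   | some m => if idx > m then some idx else some m,
   if idx ≥ number then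
     match s.2 with
     | none => some idx
     | some b => if idx < b then some idx else some b
   else s.2)

def get_left_right_close_index_alt (indexes_list : List Int) (number : Int) (type : String) : Int :=
  if indexes_list = [] then number
  else if type = "left" then
    let st := indexes_list.foldl (altStepLeft number) (none, none)
    match st.2 with
    | some b => b
    | none => st.1.getD 0
  else if type = "right" then
    let st := indexes_list.foldl (altStepRight number) (none, none)
    match st.2 with
    | some b => b
    | none => st.1.getD 0
  else 0  -- Python B returns None here; excluded by Pre_

-- ===== PRECONDITION & SPEC =====
-- Pre_ excludes only the inputs where Python A returns None instead of an int:
-- a nonempty list with `type` neither 'left' nor 'right' (falls off the outer if).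
def Pre_get_left_right_close_index (indexes_list : List Int) (number : Int) (type : String) : Prop :=
  indexes_list = [] ∨ type = "left" ∨ type = "right"
instance (indexes_list : List Int) (number : Int) (type : String) : Decidable (Pre_get_left_right_close_index indexes_list number type) := by unfold Pre_get_left_right_close_index; infer_instance
def pvWitness_get_left_right_close_index : List Int × Int × String := ([3, 1, 7], 4, "left")

def Spec_get_left_right_close_index (indexes_list : List Int) (number : Int) (type : String) (out : Int) : Prop := out = get_left_right_close_index_alt indexes_list number type
instance (indexes_list : List Int) (number : Int) (type : String) (out : Int) : Decidable (Spec_get_left_right_close_index indexes_list number type out) := by unfold Spec_get_left_right_close_index; infer_instance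

-- ===== CLAIM (what is proved, stated in full; the proofs are below) =====
def Claim_equal_get_left_right_close_index : Prop := ∀ (indexes_list : List Int) (number : Int) (type : String), Dom_get_left_right_close_index indexes_list number type → Pre_get_left_right_close_index indexes_list number type → Spec_get_left_right_close_index indexes_list number type (get_left_right_close_index indexes_list number type)

-- ===== LEMMAS AND PROOFS =====

-- characterization of B's left fold: first component is a running min, second a running max over the filtered list
theorem foldl_altStepLeft (number : Int) (l : List Int) (s : Option Int × Option Int) :
    l.foldl (altStepLeft number) s =
      (l.foldl (fun a x => match a with | none => some x | some m => some (min m x)) s.1,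
       (l.filter (fun x => decide (x ≤ number))).foldl
         (fun a x => match a with | none => some x | some m => some (max m x)) s.2) := by
  induction l generalizing s with
  | nil => rfl
  | cons x xs ih =>
    obtain ⟨s1, s2⟩ := s
    simp only [List.foldl_cons, ih, List.filter_cons]
    rw [Prod.mk.injEq]
    refine ⟨?_, ?_⟩
    · congr 1
      cases s1 with
      | none => rfl
      | some m =>
        simp only [altStepLeft]
        split_ifs <;> simp <;> omega
    · by_cases hx : x ≤ number
      · simp only [hx, decide_true, if_true, List.foldl_cons]
        congr 1
        cases s2 with
        | none => simp [altStepLeft, hx]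
        | some b =>
          simp only [altStepLeft]
          split_ifs <;> simp <;> omega
      · simp [altStepLeft, hx]

theorem foldl_altStepRight (number : Int) (l : List Int) (s : Option Int × Option Int) :
    l.foldl (altStepRight number) s =
      (l.foldl (fun a x => match a with | none => some x | some m => some (max m x)) s.1,
       (l.filter (fun x => decide (number ≤ x))).foldl
         (fun a x => match a with | none => some x | some m => some (min m x)) s.2) := by
  induction l generalizing s with
  | nil => rfl
  | cons x xs ih =>
    obtain ⟨s1, s2⟩ := s
    simp only [List.foldl_cons, ih, List.filter_cons]
    rw [Prod.mk.injEq]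
    refine ⟨?_, ?_⟩
    · congr 1
      cases s1 with
      | none => rfl
      | some m =>
        simp only [altStepRight]
        split_ifs <;> simp <;> omega
    · by_cases hx : number ≤ x
      · simp only [hx, decide_true, if_true, List.foldl_cons]
        congr 1
        cases s2 with
        | none => simp [altStepRight, hx]
        | some b =>
          simp only [altStepRight]
          split_ifs <;> simp <;> omega
      · simp [altStepRight, hx]

theorem foldl_optMin (l : List Int) (a : Int) :
    l.foldl (fun a x => match a with | none => some x | some m => some (min m x)) (some a)
      = some (l.foldl min a) := by
  induction l generalizing a with
  | nil => rfl
  | cons x xs ih => simp [List.foldl_cons, ih]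

theorem foldl_optMax (l : List Int) (a : Int) :
    l.foldl (fun a x => match a with | none => some x | some m => some (max m x)) (some a)
      = some (l.foldl max a) := by
  induction l generalizing a with
  | nil => rfl
  | cons x xs ih => simp [List.foldl_cons, ih]

theorem foldl_optMin_nil_cons (x : Int) (xs : List Int) :
    (x :: xs).foldl (fun a y => match a with | none => some y | some m => some (min m y)) none
      = some (xs.foldl min x) := by
  simp [List.foldl_cons, foldl_optMin]

theorem foldl_optMax_nil_cons (x : Int) (xs : List Int) :
    (x :: xs).foldl (fun a y => match a with | none => some y | some m => some (max m y)) none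
      = some (xs.foldl max x) := by
  simp [List.foldl_cons, foldl_optMax]

-- A's keyed min over a list of elements all ≤ number is its maximum (value-wise)
theorem min?_key_left (number : Int) (F : List Int) (M : Int) (hM : M ∈ F)
    (hub : ∀ y ∈ F, y ≤ M) (hle : ∀ y ∈ F, y ≤ number) :
    PySem.List.min? F (fun x => |number - x|) = some M := by
  cases h : PySem.List.min? F (fun x => |number - x|) with
  | none =>
    rw [PySem.List.min?_eq_none_iff] at h
    subst h; cases hM
  | some m =>
    have hmF := PySem.List.min?_mem h
    have hmin := PySem.List.min?_isMin h
    have h1 := hmin M hM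
    have h2 := hub m hmF
    have h3 := hle m hmF
    have h4 := hle M hM
    congr 1
    rw [abs_of_nonneg (by omega), abs_of_nonneg (by omega)] at h1
    omega

theorem min?_key_right (number : Int) (F : List Int) (M : Int) (hM : M ∈ F)
    (hlb : ∀ y ∈ F, M ≤ y) (hge : ∀ y ∈ F, number ≤ y) :
    PySem.List.min? F (fun x => |number - x|) = some M := by
  cases h : PySem.List.min? F (fun x => |number - x|) with
  | none =>
    rw [PySem.List.min?_eq_none_iff] at h
    subst h; cases hM
  | some m =>
    have hmF := PySem.List.min?_mem h
    have hmin := PySem.List.min?_isMin h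
    have h1 := hmin M hM
    have h2 := hlb m hmF
    have h3 := hge m hmF
    have h4 := hge M hM
    congr 1
    rw [abs_of_nonpos (by omega), abs_of_nonpos (by omega)] at h1
    omega

-- ===== VERDICT (by name: the statement is the Claim_ definition above) =====
theorem get_left_right_close_index_spec : Claim_equal_get_left_right_close_index := by
  intro l n t _ hpre
  unfold Spec_get_left_right_close_index get_left_right_close_index get_left_right_close_index_alt
  rcases hpre with hnil | ht | ht
  · simp [hnil]
  · -- type = 'left'
    subst ht
    cases l with
    | nil => simp
    | cons x xs =>
      simp only [ne_eq, List.cons_ne_nil, not_false_eq_true, if_true, if_false,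
        foldl_altStepLeft, foldl_optMin_nil_cons]
      rw [PySem.List.min?_id_cons]
      set mv := xs.foldl min x with hmv
      have hmem : mv ∈ x :: xs := by
        rcases PySem.List.foldl_min_mem xs x with h | h
        · rw [hmv, h]; exact List.mem_cons_self
        · exact List.mem_cons_of_mem _ h
      have hlb : ∀ y ∈ x :: xs, mv ≤ y := by
        intro y hy
        rcases List.mem_cons.mp hy with rfl | hy
        · exact (PySem.List.foldl_min_le xs y).1
        · exact (PySem.List.foldl_min_le xs x).2 y hy
      set F := (x :: xs).filter (fun y => decide (y ≤ n)) with hF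
      have hFle : ∀ y ∈ F, y ≤ n := by
        intro y hy; have := List.of_mem_filter hy; simpa using this
      by_cases hcase : mv ≤ n
      · -- some element ≤ n: F nonempty, both sides equal max F
        have hmvF : mv ∈ F := by
          rw [hF]; exact List.mem_filter.mpr ⟨hmem, by simpa using hcase⟩
        obtain ⟨f, fs, hFeq⟩ : ∃ f fs, F = f :: fs := by
          cases hFc : F with
          | nil => rw [hFc] at hmvF; cases hmvF
          | cons f fs => exact ⟨f, fs, rfl⟩
        rw [hFeq, foldl_optMax_nil_cons]
        set Mv := fs.foldl max f with hMv
        have hMmem : Mv ∈ F := by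
          rw [hFeq]
          rcases PySem.List.foldl_max_mem fs f with h | h
          · rw [hMv, h]; exact List.mem_cons_self
          · exact List.mem_cons_of_mem _ h
        have hMub : ∀ y ∈ F, y ≤ Mv := by
          intro y hy
          rw [hFeq] at hy
          rcases List.mem_cons.mp hy with rfl | hy
          · exact (PySem.List.le_foldl_max fs y).1
          · exact (PySem.List.le_foldl_max fs f).2 y hy
        have hkey : PySem.List.min? ((x :: xs).filter (fun idx => decide (n - idx ≥ 0)))
            (fun y => |n - y|) = some Mv := by
          have : (x :: xs).filter (fun idx => decide (n - idx ≥ 0)) = F := by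
            rw [hF]; apply List.filter_congr; intro y _; rw [decide_eq_decide]; omega
          rw [this]
          exact min?_key_left n F Mv hMmem hMub hFle
        by_cases hgt : n > mv
        · simp only [if_pos hgt, hkey, Option.getD_some]
        · -- n = mv: A returns mv, and max F = mv
          have hn : n = mv := by omega
          have h1 : Mv ≤ mv := by have := hFle Mv hMmem; omega
          have h2 : mv ≤ Mv := hMub mv hmvF
          simp only [if_neg hgt, Option.getD_some]
          omega
      · -- no element ≤ n: F = [], B falls back to running min; A takes the else branch
        have hFnil : F = [] := by
          cases hFc : F with
          | nil => rfl
          | cons f fs =>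
            exfalso
            have hfF : f ∈ F := by rw [hFc]; exact List.mem_cons_self
            have hfl : f ∈ x :: xs := List.mem_of_mem_filter hfF
            have := hFle f hfF
            have := hlb f hfl
            omega
        rw [hFnil]
        have hgt : ¬ n > mv := by omega
        simp [hgt]
  · -- type = 'right'
    subst ht
    cases l with
    | nil => simp
    | cons x xs =>
      simp only [ne_eq, List.cons_ne_nil, not_false_eq_true, if_true, if_false,
        String.reduceEq, foldl_altStepRight, foldl_optMax_nil_cons]
      rw [PySem.List.max?_id_cons]
      set mv := xs.foldl max x with hmv
      have hmem : mv ∈ x :: xs := by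
        rcases PySem.List.foldl_max_mem xs x with h | h
        · rw [hmv, h]; exact List.mem_cons_self
        · exact List.mem_cons_of_mem _ h
      have hub : ∀ y ∈ x :: xs, y ≤ mv := by
        intro y hy
        rcases List.mem_cons.mp hy with rfl | hy
        · exact (PySem.List.le_foldl_max xs y).1
        · exact (PySem.List.le_foldl_max xs x).2 y hy
      set F := (x :: xs).filter (fun y => decide (n ≤ y)) with hF
      have hFge : ∀ y ∈ F, n ≤ y := by
        intro y hy; have := List.of_mem_filter hy; simpa using this
      by_cases hcase : n ≤ mv
      · -- some element ≥ n: F nonempty, both sides equal min F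
        have hmvF : mv ∈ F := by
          rw [hF]; exact List.mem_filter.mpr ⟨hmem, by simpa using hcase⟩
        obtain ⟨f, fs, hFeq⟩ : ∃ f fs, F = f :: fs := by
          cases hFc : F with
          | nil => rw [hFc] at hmvF; cases hmvF
          | cons f fs => exact ⟨f, fs, rfl⟩
        rw [hFeq, foldl_optMin_nil_cons]
        set Mv := fs.foldl min f with hMv
        have hMmem : Mv ∈ F := by
          rw [hFeq]
          rcases PySem.List.foldl_min_mem fs f with h | h
          · rw [hMv, h]; exact List.mem_cons_self
          · exact List.mem_cons_of_mem _ h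
        have hMlb : ∀ y ∈ F, Mv ≤ y := by
          intro y hy
          rw [hFeq] at hy
          rcases List.mem_cons.mp hy with rfl | hy
          · exact (PySem.List.foldl_min_le fs y).1
          · exact (PySem.List.foldl_min_le fs f).2 y hy
        have hkey : PySem.List.min? ((x :: xs).filter (fun idx => decide (n - idx ≤ 0)))
            (fun y => |n - y|) = some Mv := by
          have : (x :: xs).filter (fun idx => decide (n - idx ≤ 0)) = F := by
            rw [hF]; apply List.filter_congr; intro y _; rw [decide_eq_decide]; omega
          rw [this]
          exact min?_key_right n F Mv hMmem hMlb hFge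
        by_cases hlt : n < mv
        · simp only [if_pos hlt, hkey, Option.getD_some]
        · -- n = mv: A returns mv, and min F = mv
          have h1 : n ≤ Mv := hFge Mv hMmem
          have h2 : Mv ≤ mv := by
            have := List.mem_of_mem_filter hMmem; exact hub Mv this
          simp only [if_neg hlt, Option.getD_some]
          omega
      · -- no element ≥ n: F = [], B falls back to running max; A takes the else branch
        have hFnil : F = [] := by
          cases hFc : F with
          | nil => rfl
          | cons f fs =>
            exfalso
            have hfF : f ∈ F := by rw [hFc]; exact List.mem_cons_self
            have hfl : f ∈ x :: xs := List.mem_of_mem_filter hfF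
            have := hFge f hfF
            have := hub f hfl
            omega
        rw [hFnil]
        have hlt : ¬ n < mv := by omega
        simp [hlt]
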